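-- pv_equiv track=rewrite | github.com/lukehenderson1996/pythonNotes | scripts/plot.py | outerJoin
-- ===== SOURCE A (Python) =====
-- def outerJoin(xListList, yListList):
--     '''Combines data with different x value sets.\n
--     y values will be set to None in the case of missing data\n
--     Args:
--         xListList [list of list of int/float]: sets of x values\n
--         yListList [list of list of int/float/bool/None]: sets of y values
--     Return:
--         [list of int/float, list of list of int/float/bool/None]
--     Notes:
--         xListList and yListList must be of the same length,\n
--         but the data sets themselves can be different lengths'''
--     assert len(xListList) == len(yListList)
--     masterLen = len(xListList)
--     for xList in xListList:
--         for item in xList: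
--             assert isinstance(item, int) or isinstance(item, float)
--     for yList in yListList:
--         for item in yList:
--             assert isinstance(item, int) or isinstance(item, float) or (item is None)
--
--     # dt.info(xListList)
--     xMerged = []
--     for xList in xListList:
--         for item in xList:
--             if item in xMerged:
--                 pass
--             else:
--                 xMerged.append(item)
--     xMerged.sort()
--     # dt.info(xMerged, 'xMerged')
--
--     yMerged = []
--     for i in range(masterLen):
--         yMerged.append([]) #this new empty list can be accessed as yMerged[i]
--         for x in xMerged:
--             if x in xListList[i]:
--                 thisIdx = xListList[i].index(x)
--                 yMerged[i].append(yListList[i][thisIdx])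
--             else:
--                 yMerged[i].append(None)
--     # dt.info(yMerged, 'yMerged')
--
--     return xMerged, yMerged
-- ===== SOURCE B (Python) =====
-- def outerJoin(xListList, yListList):
--     '''Outer-join by one populating pass: a table x -> row of length masterLen,
--     filled series by series (first occurrence of a duplicate x wins), then
--     emitted in sorted key order.'''
--     assert len(xListList) == len(yListList)
--     masterLen = len(xListList)
--     table = {}
--     for i, (xs, ys) in enumerate(zip(xListList, yListList)):
--         seen = set()
--         for x, y in zip(xs, ys):
--             if x not in seen:
--                 seen.add(x)
--                 table.setdefault(x, [None] * masterLen)[i] = y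
--     xMerged = sorted(table)
--     yMerged = [[table[x][i] for x in xMerged] for i in range(masterLen)]
--     return xMerged, yMerged
-- ===== Notes on version B (the rewrite author's own statement) =====
-- stated objective: faster
-- what changed: Inverts A's per-merged-x nested scans (membership test plus .index over each series for every merged x) into a single populating pass that fills one dict table mapping each x to a preallocated row, guarded by a per-series seen set so the first occurrence wins, then emits the sorted keys and the table columns.
import Mathlib
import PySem

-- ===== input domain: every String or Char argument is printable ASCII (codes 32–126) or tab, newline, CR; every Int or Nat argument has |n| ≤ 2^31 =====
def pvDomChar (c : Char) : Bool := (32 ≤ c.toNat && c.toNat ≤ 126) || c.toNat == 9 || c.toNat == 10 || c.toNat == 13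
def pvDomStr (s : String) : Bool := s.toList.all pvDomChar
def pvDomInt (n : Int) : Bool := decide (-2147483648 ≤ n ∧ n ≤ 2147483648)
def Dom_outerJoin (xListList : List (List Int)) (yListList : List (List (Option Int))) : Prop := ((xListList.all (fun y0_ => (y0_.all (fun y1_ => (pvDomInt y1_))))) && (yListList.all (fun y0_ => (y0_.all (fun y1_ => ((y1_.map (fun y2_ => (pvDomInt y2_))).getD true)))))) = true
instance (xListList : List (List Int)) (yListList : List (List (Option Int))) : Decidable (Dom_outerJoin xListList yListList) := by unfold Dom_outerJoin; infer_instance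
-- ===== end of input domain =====

-- ===== PORT A =====
-- Literal port of A: nested dedup loops, in-place sort, then for each series a scan of
-- xMerged with membership test + .index + indexing (pyGet?; Pre_ excludes the IndexError).
def outerJoin (xListList : List (List Int)) (yListList : List (List (Option Int))) : List Int × List (List (Option Int)) :=
  let masterLen := xListList.length
  let xMerged0 := xListList.foldl
    (fun acc xList => xList.foldl (fun acc item => if acc.contains item then acc else acc ++ [item]) acc) []
  let xMerged := PySem.List.sorted xMerged0 (fun x => x) false
  let yMerged := (List.range masterLen).foldl
    (fun ym i =>
      let xsi := xListList.getD i []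
      let ysi := yListList.getD i []
      ym ++ [xMerged.foldl
        (fun row x =>
          row ++ [if xsi.contains x then
                    (PySem.List.pyGet? ysi (((PySem.List.index? xsi x).getD 0 : Nat) : Int)).getD none
                  else none]) []]) []
  (xMerged, yMerged)

-- ===== PORT B =====
-- Port of B (Source B): one populating pass over enumerate(zip(xss, yss)): the inner loop
-- carries (seen, table); 'table.setdefault(x, [None]*masterLen)[i] = y' is exactly
-- Dict.modify x (replicate masterLen none) (·.set i y) (same insertion position, same row).
def outerJoinAltSeries (masterLen i : Nat) (table : PySem.Dict Int (List (Option Int)))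
    (xs : List Int) (ys : List (Option Int)) : PySem.Dict Int (List (Option Int)) :=
  ((xs.zip ys).foldl
    (fun st p =>
      if PySem.Set.contains st.1 p.1 then st
      else (PySem.Set.add st.1 p.1,
            st.2.modify p.1 (List.replicate masterLen none) (fun row => row.set i p.2)))
    ((PySem.Set.empty : PySem.Set Int), table)).2

def outerJoinAltBuild (masterLen : Nat) :
    Nat → PySem.Dict Int (List (Option Int)) → List (List Int × List (Option Int)) →
    PySem.Dict Int (List (Option Int))
  | _, table, [] => table
  | i, table, p :: rest => outerJoinAltBuild masterLen (i + 1) (outerJoinAltSeries masterLen i table p.1 p.2) rest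

def outerJoin_alt (xListList : List (List Int)) (yListList : List (List (Option Int))) : List Int × List (List (Option Int)) :=
  let masterLen := xListList.length
  let table := outerJoinAltBuild masterLen 0 PySem.Dict.empty (xListList.zip yListList)
  let xMerged := PySem.List.sorted table.keys (fun x => x) false
  -- 'table[x][i]' never misses a key or the index; ported totally with getD defaults
  let yMerged := (List.range masterLen).map (fun i => xMerged.map (fun x => (table.getD x []).getD i none))
  (xMerged, yMerged)

-- ===== PRECONDITION & SPEC =====
-- Pre_ excludes exactly the inputs on which A raises: the AssertionError when the outer
-- lists differ in length, and the IndexError when some x's first index in xListList[i]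
-- is out of range of yListList[i].
def Pre_outerJoin (xListList : List (List Int)) (yListList : List (List (Option Int))) : Prop :=
  xListList.length = yListList.length ∧
    ∀ p ∈ xListList.zip yListList, ∀ x ∈ p.1, p.1.idxOf x < p.2.length
instance (xListList : List (List Int)) (yListList : List (List (Option Int))) : Decidable (Pre_outerJoin xListList yListList) := by unfold Pre_outerJoin; infer_instance
def pvWitness_outerJoin : List (List Int) × List (List (Option Int)) :=
  ([[1, 2], [2, 3]], [[some 1, none], [some 5, some 6]])
def Spec_outerJoin (xListList : List (List Int)) (yListList : List (List (Option Int))) (out : List Int × List (List (Option Int))) : Prop := out = outerJoin_alt xListList yListList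
instance (xListList : List (List Int)) (yListList : List (List (Option Int))) (out : List Int × List (List (Option Int))) : Decidable (Spec_outerJoin xListList yListList out) := by unfold Spec_outerJoin; infer_instance

-- ===== CLAIM (what is proved, stated in full; the proofs are below) =====
def Claim_equal_outerJoin : Prop := ∀ (xListList : List (List Int)) (yListList : List (List (Option Int))), Dom_outerJoin xListList yListList → Pre_outerJoin xListList yListList → Spec_outerJoin xListList yListList (outerJoin xListList yListList)

-- ===== LEMMAS AND PROOFS =====

-- the y value of the FIRST pair of the zipped series whose x equals the given x (none if absent)
def firstY (xs : List Int) (ys : List (Option Int)) (x : Int) : Option Int :=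
  match (xs.zip ys).find? (fun q => q.1 == x) with
  | some q => q.2
  | none => none

theorem dedup_eq_ofList_flatMap (xss : List (List Int)) (acc : List Int) :
    xss.foldl (fun acc xList => xList.foldl (fun acc item => if acc.contains item then acc else acc ++ [item]) acc) acc
      = PySem.Set.update acc (xss.flatMap (fun xs => xs)) := by
  induction xss generalizing acc with
  | nil => simp [PySem.Set.update]
  | cons h t ih =>
      simp only [List.foldl_cons, List.flatMap_cons, ih]
      simp only [PySem.Set.update, List.foldl_append]
      congr 1

theorem find_zip_eq (xs : List Int) (ys : List (Option Int)) (x : Int)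
    (hx : x ∈ xs) (hlt : xs.idxOf x < ys.length) :
    (xs.zip ys).find? (fun q => q.1 == x) = some (x, ys[xs.idxOf x]'hlt) := by
  induction xs generalizing ys with
  | nil => simp at hx
  | cons a t ih =>
      cases ys with
      | nil => simp [List.idxOf] at hlt
      | cons b u =>
          by_cases ha : a = x
          · simp [ha, List.idxOf_cons_self]
          · have hx' : x ∈ t := by
              rcases List.mem_cons.mp hx with h | h
              · exact (ha h.symm).elim
              · exact h
            have hia : t.idxOf x < u.length := by
              have := hlt
              simpa [List.idxOf_cons, ha] using this
            simp [List.zip_cons_cons, ha, ih u hx' hia]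

theorem find_zip_none (xs : List Int) (ys : List (Option Int)) (x : Int) (hx : x ∉ xs) :
    (xs.zip ys).find? (fun q => q.1 == x) = none := by
  induction xs generalizing ys with
  | nil => simp
  | cons a t ih =>
      cases ys with
      | nil => simp
      | cons b u =>
          have ha : a ≠ x := fun h => hx (h ▸ List.mem_cons_self)
          have hx' : x ∉ t := fun h => hx (List.mem_cons_of_mem _ h)
          simp [ha, ih u hx']

theorem idxOf?_of_mem (xs : List Int) (x : Int) (hx : x ∈ xs) : xs.idxOf? x = some (xs.idxOf x) := by
  induction xs with
  | nil => simp at hx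
  | cons a t ih =>
      by_cases h : a = x
      · simp [h, List.idxOf?_cons]
      · rcases List.mem_cons.mp hx with h2 | h2
        · exact (h h2.symm).elim
        · simp [List.idxOf?_cons, h, ih h2]

-- A's entry expression equals firstY on Pre_ inputs
theorem entryA_eq_firstY (xs : List Int) (ys : List (Option Int)) (x : Int)
    (h : ∀ x' ∈ xs, xs.idxOf x' < ys.length) :
    (if xs.contains x then
        (PySem.List.pyGet? ys (((PySem.List.index? xs x).getD 0 : Nat) : Int)).getD none
      else none)
      = firstY xs ys x := by
  unfold firstY
  by_cases hx : x ∈ xs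
  · have hlt : xs.idxOf x < ys.length := h x hx
    rw [find_zip_eq xs ys x hx hlt]
    have hidx : (PySem.List.index? xs x).getD 0 = xs.idxOf x := by
      rw [PySem.List.index?_eq_idxOf?, idxOf?_of_mem xs x hx]; rfl
    rw [hidx]
    simp [hx, PySem.List.pyGet?, PySem.List.pyIdx?, hlt]
  · rw [find_zip_none xs ys x hx]
    simp [hx]

-- row read out of one processed series (generalized over the seen set)
theorem series_fold_getD (m i : Nat) (l : List (Int × Option Int))
    (s : PySem.Set Int) (t : PySem.Dict Int (List (Option Int))) (x : Int) :
    ((l.foldl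
        (fun st p =>
          if PySem.Set.contains st.1 p.1 then st
          else (PySem.Set.add st.1 p.1,
                st.2.modify p.1 (List.replicate m none) (fun row => row.set i p.2)))
        (s, t)).2).getD x (List.replicate m none)
      = if x ∈ l.map Prod.fst ∧ PySem.Set.contains s x = false then
          (t.getD x (List.replicate m none)).set i
            (match l.find? (fun q => q.1 == x) with | some q => q.2 | none => none)
        else t.getD x (List.replicate m none) := by
  induction l generalizing s t with
  | nil => simp
  | cons p rest ih =>
      simp only [List.foldl_cons]
      by_cases hc : PySem.Set.contains s p.1 = true
      · rw [if_pos hc, ih]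
        by_cases hx : x = p.1
        · subst hx
          simp only [hc]
          simp
        · have hf : List.find? (fun q => q.1 == x) (p :: rest) = List.find? (fun q => q.1 == x) rest := by
            simp [Ne.symm hx]
          simp only [List.map_cons, List.mem_cons, hf]
          refine if_congr ?_ rfl rfl
          simp [hx]
      · rw [if_neg hc, ih]
        by_cases hx : x = p.1
        · subst hx
          have h1 : PySem.Set.contains (PySem.Set.add s p.1) p.1 = true := by
            simp [PySem.Set.contains, PySem.Set.mem_add]
          have hcf : PySem.Set.contains s p.1 = false := by simpa using hc
          simp only [h1, hcf, List.map_cons, List.mem_cons, List.find?_cons, beq_self_eq_true]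
          simp
        · have h2 : PySem.Set.contains (PySem.Set.add s p.1) x = PySem.Set.contains s x := by
            simp [PySem.Set.contains, PySem.Set.mem_add, hx]
          have h3 := PySem.Dict.getD_modify t p.1 x (List.replicate m none) (fun row => row.set i p.2)
          rw [if_neg hx] at h3
          have hf : List.find? (fun q => q.1 == x) (p :: rest) = List.find? (fun q => q.1 == x) rest := by
            simp [Ne.symm hx]
          rw [h3]
          simp only [List.map_cons, List.mem_cons, hf, h2]
          refine if_congr ?_ rfl rfl
          simp [hx]

theorem series_fold_mem_keys (m i : Nat) (l : List (Int × Option Int))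
    (s : PySem.Set Int) (t : PySem.Dict Int (List (Option Int))) (x : Int) :
    (x ∈ ((l.foldl
        (fun st p =>
          if PySem.Set.contains st.1 p.1 then st
          else (PySem.Set.add st.1 p.1,
                st.2.modify p.1 (List.replicate m none) (fun row => row.set i p.2)))
        (s, t)).2).keys)
      ↔ (x ∈ t.keys ∨ (x ∈ l.map Prod.fst ∧ PySem.Set.contains s x = false)) := by
  induction l generalizing s t with
  | nil => simp
  | cons p rest ih =>
      simp only [List.foldl_cons]
      by_cases hc : PySem.Set.contains s p.1 = true
      · have hm : p.1 ∈ s := by simpa [PySem.Set.contains] using hc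
        rw [if_pos hc, ih]
        by_cases hx : x = p.1
        · subst hx; simp [hm]
        · simp only [List.map_cons, List.mem_cons]
          constructor
          · rintro (h | ⟨h1, h2⟩)
            · exact Or.inl h
            · exact Or.inr ⟨Or.inr h1, h2⟩
          · rintro (h | ⟨(h1 | h1), h2⟩)
            · exact Or.inl h
            · exact absurd h1 hx
            · exact Or.inr ⟨h1, h2⟩
      · have hnm : p.1 ∉ s := by simpa [PySem.Set.contains] using hc
        rw [if_neg hc, ih]
        have hkeys : x ∈ (t.modify p.1 (List.replicate m none) (fun row => row.set i p.2)).keys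
            ↔ (x = p.1 ∨ x ∈ t.keys) := by
          rw [PySem.Dict.keys_modify]
          exact PySem.Dict.mem_keys_insert _ _ _ _
        have h2 : x ∈ PySem.Set.add s p.1 ↔ (x ∈ s ∨ x = p.1) := PySem.Set.mem_add s p.1 x
        have hco : ∀ (u : PySem.Set Int), PySem.Set.contains u x = false ↔ x ∉ u := by
          intro u; simp [PySem.Set.contains]
        rw [hkeys]
        simp only [List.map_cons, List.mem_cons, hco, h2]
        by_cases hx : x = p.1
        · subst hx; simp [hnm]
        · simp [hx]

theorem series_fold_nodup (m i : Nat) (l : List (Int × Option Int))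
    (s : PySem.Set Int) (t : PySem.Dict Int (List (Option Int))) (h : t.keys.Nodup) :
    ((l.foldl
        (fun st p =>
          if PySem.Set.contains st.1 p.1 then st
          else (PySem.Set.add st.1 p.1,
                st.2.modify p.1 (List.replicate m none) (fun row => row.set i p.2)))
        (s, t)).2).keys.Nodup := by
  induction l generalizing s t with
  | nil => exact h
  | cons p rest ih =>
      simp only [List.foldl_cons]
      by_cases hc : PySem.Set.contains s p.1 = true
      · rw [if_pos hc]; exact ih _ _ h
      · rw [if_neg hc]
        apply ih
        rw [PySem.Dict.keys_modify]
        exact PySem.Dict.nodup_keys_insert _ _ _ h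

theorem series_getD (m i : Nat) (t : PySem.Dict Int (List (Option Int)))
    (xs : List Int) (ys : List (Option Int)) (x : Int) :
    (outerJoinAltSeries m i t xs ys).getD x (List.replicate m none)
      = if x ∈ (xs.zip ys).map Prod.fst then
          (t.getD x (List.replicate m none)).set i (firstY xs ys x)
        else t.getD x (List.replicate m none) := by
  unfold outerJoinAltSeries firstY
  rw [series_fold_getD]
  by_cases hx : x ∈ (xs.zip ys).map Prod.fst <;> simp [hx]

theorem series_mem_keys (m i : Nat) (t : PySem.Dict Int (List (Option Int)))
    (xs : List Int) (ys : List (Option Int)) (x : Int) :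
    x ∈ (outerJoinAltSeries m i t xs ys).keys ↔ (x ∈ t.keys ∨ x ∈ (xs.zip ys).map Prod.fst) := by
  unfold outerJoinAltSeries
  rw [series_fold_mem_keys]
  by_cases hx : x ∈ (xs.zip ys).map Prod.fst <;> simp [hx]

theorem series_len (m i : Nat) (t : PySem.Dict Int (List (Option Int)))
    (xs : List Int) (ys : List (Option Int))
    (h : ∀ x, (t.getD x (List.replicate m none)).length = m) (x : Int) :
    ((outerJoinAltSeries m i t xs ys).getD x (List.replicate m none)).length = m := by
  rw [series_getD]
  split_ifs <;> simp [h]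

theorem build_getD (m : Nat) (ps : List (List Int × List (Option Int))) (i : Nat)
    (t : PySem.Dict Int (List (Option Int)))
    (hlen : ∀ x, (t.getD x (List.replicate m none)).length = m)
    (x : Int) (j : Nat) (hj : j < m) :
    ((outerJoinAltBuild m i t ps).getD x (List.replicate m none)).getD j none
      = if i ≤ j ∧ j - i < ps.length then
          (if x ∈ ((ps.getD (j - i) ([], [])).1.zip (ps.getD (j - i) ([], [])).2).map Prod.fst then
             firstY (ps.getD (j - i) ([], [])).1 (ps.getD (j - i) ([], [])).2 x
           else (t.getD x (List.replicate m none)).getD j none)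
        else (t.getD x (List.replicate m none)).getD j none := by
  induction ps generalizing i t with
  | nil => simp [outerJoinAltBuild]
  | cons p rest ih =>
      simp only [outerJoinAltBuild]
      rw [ih (i + 1) _ (fun x => series_len m i t p.1 p.2 hlen x)]
      rcases Nat.lt_trichotomy j i with hj' | rfl | hj'
      · have c1 : ¬ (i + 1 ≤ j ∧ j - (i + 1) < rest.length) := by omega
        have c2 : ¬ (i ≤ j ∧ j - i < (p :: rest).length) := by omega
        rw [if_neg c1, if_neg c2, series_getD]
        split_ifs with hmem
        · simp [List.getD, List.getElem?_set_ne (show i ≠ j by omega)]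
        · rfl
      · have c1 : ¬ (j + 1 ≤ j ∧ j - (j + 1) < rest.length) := by omega
        have c2 : j ≤ j ∧ j - j < (p :: rest).length := ⟨Nat.le_refl _, by simp⟩
        rw [if_neg c1, if_pos c2, series_getD]
        simp only [Nat.sub_self, List.getD_cons_zero]
        split_ifs with hmem
        · have hl : j < (t.getD x (List.replicate m none)).length := by rw [hlen]; exact hj
          simp [List.getD, hl]
        · rfl
      · have hsub : j - i = (j - (i + 1)) + 1 := by omega
        have hgd : (p :: rest).getD (j - i) ([], []) = rest.getD (j - (i + 1)) ([], []) := by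
          rw [hsub]; rfl
        have hcond : (i + 1 ≤ j ∧ j - (i + 1) < rest.length) ↔ (i ≤ j ∧ j - i < (p :: rest).length) := by
          simp only [List.length_cons]; omega
        by_cases hcm : i + 1 ≤ j ∧ j - (i + 1) < rest.length
        · rw [if_pos hcm, if_pos (hcond.mp hcm), hgd]
          split_ifs with hmem
          · rfl
          · rw [series_getD]
            split_ifs with hmem2
            · simp [List.getD, List.getElem?_set_ne (show i ≠ j by omega)]
            · rfl
        · rw [if_neg hcm, if_neg (fun h => hcm (hcond.mpr h)), series_getD]
          split_ifs with hmem
          · simp [List.getD, List.getElem?_set_ne (show i ≠ j by omega)]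
          · rfl

theorem build_mem_keys (m : Nat) (ps : List (List Int × List (Option Int))) (i : Nat)
    (t : PySem.Dict Int (List (Option Int))) (x : Int) :
    x ∈ (outerJoinAltBuild m i t ps).keys
      ↔ (x ∈ t.keys ∨ ∃ q ∈ ps, x ∈ (q.1.zip q.2).map Prod.fst) := by
  induction ps generalizing i t with
  | nil => simp [outerJoinAltBuild]
  | cons p rest ih =>
      simp only [outerJoinAltBuild, ih, series_mem_keys, List.mem_cons]
      constructor
      · rintro ((h | h) | ⟨q, hq, hx⟩)
        · exact Or.inl h
        · exact Or.inr ⟨p, Or.inl rfl, h⟩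
        · exact Or.inr ⟨q, Or.inr hq, hx⟩
      · rintro (h | ⟨q, (rfl | hq), hx⟩)
        · exact Or.inl (Or.inl h)
        · exact Or.inl (Or.inr hx)
        · exact Or.inr ⟨q, hq, hx⟩

theorem build_nodup (m : Nat) (ps : List (List Int × List (Option Int))) (i : Nat)
    (t : PySem.Dict Int (List (Option Int))) (h : t.keys.Nodup) :
    (outerJoinAltBuild m i t ps).keys.Nodup := by
  induction ps generalizing i t with
  | nil => exact h
  | cons p rest ih => exact ih _ _ (series_fold_nodup m i _ _ _ h)

theorem mem_map_fst_zip_of (xs : List Int) (ys : List (Option Int)) (x : Int)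
    (hx : x ∈ xs) (h : xs.idxOf x < ys.length) : x ∈ (xs.zip ys).map Prod.fst := by
  have h1 : xs.idxOf x < xs.length := List.idxOf_lt_length_of_mem hx
  have hz : xs.idxOf x < (xs.zip ys).length := by simp [List.length_zip]; omega
  refine List.mem_map.mpr ⟨(xs.zip ys)[xs.idxOf x]'hz, List.getElem_mem hz, ?_⟩
  simp [List.getElem_zip, List.getElem_idxOf]

theorem mem_of_mem_map_fst_zip (xs : List Int) (ys : List (Option Int)) (x : Int)
    (h : x ∈ (xs.zip ys).map Prod.fst) : x ∈ xs := by
  obtain ⟨r, hr, rfl⟩ := List.mem_map.mp h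
  exact (List.of_mem_zip hr).1

-- ===== VERDICT (by name: the statement is the Claim_ definition above) =====
theorem outerJoin_spec : Claim_equal_outerJoin := by
  intro xss yss _ hpre
  obtain ⟨hlen, hidx⟩ := hpre
  unfold Spec_outerJoin outerJoin outerJoin_alt
  have hlenR : ∀ x : Int,
      ((PySem.Dict.empty : PySem.Dict Int (List (Option Int))).getD x (List.replicate xss.length none)).length = xss.length := by
    intro x; simp [PySem.Dict.getD_empty]
  have hpslen : (xss.zip yss).length = xss.length := by simp [List.length_zip, hlen]
  have hmem : ∀ x : Int,
      x ∈ (outerJoinAltBuild xss.length 0 PySem.Dict.empty (xss.zip yss)).keys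
        ↔ x ∈ PySem.Set.ofList (xss.flatMap (fun xs => xs)) := by
    intro x
    rw [build_mem_keys, PySem.Set.mem_ofList, List.mem_flatMap]
    constructor
    · rintro (h | ⟨q, hq, hxq⟩)
      · simp [PySem.Dict.keys_empty] at h
      · exact ⟨q.1, (List.of_mem_zip (by exact hq : (q.1, q.2) ∈ xss.zip yss)).1,
          mem_of_mem_map_fst_zip q.1 q.2 x hxq⟩
    · rintro ⟨l, hl, hxl⟩
      right
      obtain ⟨i, hi, rfl⟩ := List.mem_iff_getElem.mp hl
      have hz : (xss[i], yss[i]) ∈ xss.zip yss := by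
        rw [List.mem_iff_getElem]
        exact ⟨i, by rw [hpslen]; exact hi, by rw [List.getElem_zip]⟩
      exact ⟨(xss[i], yss[i]), hz, mem_map_fst_zip_of _ _ _ hxl (hidx _ hz _ hxl)⟩
  have hperm : (outerJoinAltBuild xss.length 0 PySem.Dict.empty (xss.zip yss)).keys.Perm
      (PySem.Set.ofList (xss.flatMap (fun xs => xs))) :=
    (List.perm_ext_iff_of_nodup (build_nodup _ _ _ _ PySem.Dict.nodup_keys_empty)
      (PySem.Set.nodup_ofList _)).mpr hmem
  have hxm : PySem.List.sorted
      (xss.foldl (fun acc xList => xList.foldl (fun acc item => if acc.contains item then acc else acc ++ [item]) acc) [])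
      (fun x => x) false
      = PySem.List.sorted (outerJoinAltBuild xss.length 0 PySem.Dict.empty (xss.zip yss)).keys (fun x => x) false := by
    rw [dedup_eq_ofList_flatMap]
    have hup : PySem.Set.update ([] : List Int) (xss.flatMap (fun xs => xs))
        = PySem.Set.ofList (xss.flatMap (fun xs => xs)) := rfl
    rw [hup]
    exact PySem.List.sorted_eq_sorted_of_perm _ _ _ (fun a b h => h) hperm.symm
  dsimp only
  rw [hxm]
  refine Prod.ext rfl ?_
  rw [PySem.List.foldl_append_singleton_eq_map]
  simp only [List.nil_append]
  apply List.map_congr_left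
  intro i hi
  have him : i < xss.length := List.mem_range.mp hi
  have hiy : i < yss.length := by omega
  rw [PySem.List.foldl_append_singleton_eq_map]
  simp only [List.nil_append]
  apply List.map_congr_left
  intro x hx
  have hgx : xss.getD i [] = xss[i] := List.getD_eq_getElem xss [] him
  have hgy : yss.getD i [] = yss[i] := List.getD_eq_getElem yss [] hiy
  have hz : (xss[i], yss[i]) ∈ xss.zip yss := by
    rw [List.mem_iff_getElem]
    exact ⟨i, by rw [hpslen]; exact him, by rw [List.getElem_zip]⟩
  rw [hgx, hgy, entryA_eq_firstY xss[i] yss[i] x (fun x' hx' => hidx _ hz x' hx')]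
  -- B's entry: switch the default [] to the row default, then read the built table
  have hxk : x ∈ (outerJoinAltBuild xss.length 0 PySem.Dict.empty (xss.zip yss)).keys := by
    rw [PySem.List.mem_sorted] at hx
    exact hx
  have hdef : (outerJoinAltBuild xss.length 0 PySem.Dict.empty (xss.zip yss)).getD x []
      = (outerJoinAltBuild xss.length 0 PySem.Dict.empty (xss.zip yss)).getD x (List.replicate xss.length none) := by
    rw [PySem.Dict.getD_eq_get?_getD, PySem.Dict.getD_eq_get?_getD]
    cases hget : (outerJoinAltBuild xss.length 0 PySem.Dict.empty (xss.zip yss)).get? x with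
    | none => exact absurd hxk ((PySem.Dict.get?_eq_none_iff_not_mem_keys _ _).mp hget)
    | some v => rfl
  rw [hdef, build_getD xss.length (xss.zip yss) 0 PySem.Dict.empty hlenR x i him]
  have hc : 0 ≤ i ∧ i - 0 < (xss.zip yss).length := ⟨Nat.zero_le _, by omega⟩
  rw [if_pos hc]
  have hq : (xss.zip yss).getD (i - 0) ([], []) = (xss[i], yss[i]) := by
    simp only [Nat.sub_zero]
    rw [List.getD_eq_getElem _ _ (by rw [hpslen]; exact him), List.getElem_zip]
  rw [hq]
  by_cases hmemi : x ∈ (xss[i].zip yss[i]).map Prod.fst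
  · rw [if_pos hmemi]
  · rw [if_neg hmemi]
    have hnx : x ∉ xss[i] := fun hxin => hmemi (mem_map_fst_zip_of _ _ _ hxin (hidx _ hz _ hxin))
    unfold firstY
    rw [find_zip_none _ _ _ hnx]
    simp [PySem.Dict.getD_empty]
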